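/- GENERATED by c/gen_decode.py: decode facts of the image, one per distinct instruction byte string. -/
import UserX.DecodeImage

#decode_all ProgX.Base.Dec
  "4156"  -- push r14
  "4881fb08101400"  -- cmp rbx,0x141008
  "48896be0"  -- mov QWORD PTR [rbx-0x20],rbp
  "488b142500008000"  -- mov rdx,QWORD PTR ds:0x800000
  "48c782280080004c495645"  -- mov QWORD PTR [rdx+0x800028],0x4556494c
  "4c01f3"  -- add rbx,r14
  "660f28c3"  -- movapd xmm0,xmm3
  "66480f6ec3"  -- movq xmm0,rbx
  "745a"  -- je 103bb4
  "7749"  -- ja 100257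
  "84d2"  -- test dl,dl
  "be10000000"  -- mov esi,0x10
  "e875fbffff"  -- call 102040
  "e8e2faffff"  -- call 101d00
  "eb94"  -- jmp 101321
  "f20f102424"  -- movsd xmm4,QWORD PTR [rsp]
  "f20f59059ddc0300"  -- mulsd xmm0,QWORD PTR [rip+0x3dc9d]
  "f20f5cda"  -- subsd xmm3,xmm2
  "f4"  -- hlt
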